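-- pv_equiv track=rewrite | github.com/eduardoleon9010/python_en_accion | scripts/funciones_python/comprimir.py | comprimir
-- ===== SOURCE A (Python) =====
-- def comprimir(cadena: str) -> tuple:
--     """
--     Comprime una cadena de ceros y unos encontrando las secuencias de unos y devolviendo
--     una tupla con la longitud original de la cadena y una lista de tuplas con la posición
--     y el tamaño de cada secuencia de unos.
--
--     Args:
--     cadena (str): La cadena de ceros y unos a comprimir.
--
--     Returns:
--     tuple: Una tupla con la longitud original de la cadena y una lista de tuplas
--     con la posición y el tamaño de cada secuencia de unos.
--     """
--     longitud_original = len(cadena)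
--     secuencias = []
--     i = 0
--     while i < len(cadena):
--         if cadena[i] == '1':
--             inicio = i
--             longitud = 0
--             while i < len(cadena) and cadena[i] == '1':
--                 longitud += 1
--                 i += 1
--             secuencias.append((inicio, longitud))
--         else:
--             i += 1
--     return longitud_original, secuencias
-- ===== SOURCE B (Python) =====
-- def comprimir(cadena: str) -> tuple:
--     longitud_original = len(cadena)
--     normalizada = ''.join(c if c == '1' else '0' for c in cadena)
--     secuencias = []
--     offset = 0
--     for parte in normalizada.split('0'):
--         if parte:
--             secuencias.append((offset, len(parte)))
--         offset += len(parte) + 1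
--     return longitud_original, secuencias
-- ===== Notes on version B (the rewrite author's own statement) =====
-- stated objective: alternative
-- what changed: Replaces A's index-based nested-while character scan with a normalise-to-0/1 pass, a single str.split('0'), and one offset-keeping loop over the parts.
import Mathlib
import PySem

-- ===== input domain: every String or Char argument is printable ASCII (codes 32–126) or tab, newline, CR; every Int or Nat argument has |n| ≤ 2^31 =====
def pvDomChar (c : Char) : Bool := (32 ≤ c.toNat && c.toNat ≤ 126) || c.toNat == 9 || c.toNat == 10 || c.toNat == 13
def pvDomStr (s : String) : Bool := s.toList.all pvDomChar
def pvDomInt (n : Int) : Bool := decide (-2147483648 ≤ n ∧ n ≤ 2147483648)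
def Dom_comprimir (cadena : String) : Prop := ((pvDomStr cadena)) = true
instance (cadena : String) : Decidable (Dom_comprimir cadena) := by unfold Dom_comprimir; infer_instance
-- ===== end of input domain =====

-- B replaces A's index-juggling nested-while scan by normalise + split('0') + one offset-keeping pass (alternative decomposition, same cost).

-- ===== PORT A =====
-- inner while: count the leading '1's, return (longitud, remaining characters)
def pvRunOnes : List Char → Nat × List Char
  | [] => (0, [])
  | c :: rest =>
    if c = '1' then ((pvRunOnes rest).1 + 1, (pvRunOnes rest).2)
    else (0, c :: rest)

-- needed by the port's termination proof
theorem pvRunOnes_snd_le (l : List Char) : (pvRunOnes l).2.length ≤ l.length := by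
  induction l with
  | nil => simp [pvRunOnes]
  | cons c rest ih =>
    simp only [pvRunOnes]
    split
    · simpa using Nat.le_succ_of_le ih
    · simp

-- outer while over the remaining characters, i the current index
def pvLoopA : List Char → Int → List (Int × Int)
  | [], _ => []
  | c :: rest, i =>
    if h : c = '1' then
      (i, ((pvRunOnes (c :: rest)).1 : Int)) ::
        pvLoopA (pvRunOnes (c :: rest)).2 (i + (pvRunOnes (c :: rest)).1)
    else
      pvLoopA rest (i + 1)
termination_by l _ => l.length
decreasing_by
  · simp only [pvRunOnes, if_pos h, List.length_cons]
    exact Nat.lt_succ_of_le (pvRunOnes_snd_le rest)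
  · simp

def comprimir (cadena : String) : Int × (List (Int × Int)) :=
  ((cadena.toList.length : Int), pvLoopA cadena.toList 0)

-- ===== PORT B =====
-- normalizada = ''.join(c if c == '1' else '0' for c in cadena)
def pvNorm (l : List Char) : List Char := l.map (fun c => if c = '1' then c else '0')

-- exact hand port of Python's str.split('0') (single-character separator)
def pySplit0 : List Char → List (List Char)
  | [] => [[]]
  | c :: t =>
    if c = '0' then [] :: pySplit0 t
    else (c :: (pySplit0 t).headI) :: (pySplit0 t).tail

-- the for-loop: keeps (offset, secuencias)
def pvLoopB : List (List Char) → Int → List (Int × Int) → List (Int × Int)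
  | [], _, acc => acc
  | p :: ps, offset, acc =>
    pvLoopB ps (offset + (p.length : Int) + 1)
      (if p.isEmpty then acc else acc ++ [(offset, (p.length : Int))])

def comprimir_alt (cadena : String) : Int × (List (Int × Int)) :=
  ((cadena.toList.length : Int), pvLoopB (pySplit0 (pvNorm cadena.toList)) 0 [])

-- ===== PRECONDITION & SPEC =====
def Spec_comprimir (cadena : String) (out : Int × (List (Int × Int))) : Prop := out = comprimir_alt cadena
instance (cadena : String) (out : Int × (List (Int × Int))) : Decidable (Spec_comprimir cadena out) := by unfold Spec_comprimir; infer_instance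

-- ===== CLAIM (what is proved, stated in full; the proofs are below) =====
def Claim_equal_comprimir : Prop := ∀ (cadena : String), Dom_comprimir cadena → Spec_comprimir cadena (comprimir cadena)

-- ===== LEMMAS AND PROOFS =====

theorem pySplit0_ne_nil (l : List Char) : pySplit0 l ≠ [] := by
  cases l with
  | nil => simp [pySplit0]
  | cons c t => simp only [pySplit0]; split <;> simp

theorem pySplit0_cons_zero (t : List Char) : pySplit0 ('0' :: t) = [] :: pySplit0 t := by
  simp [pySplit0]

theorem pvRunOnes_decomp (l : List Char) :
    l = List.replicate (pvRunOnes l).1 '1' ++ (pvRunOnes l).2 := by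
  induction l with
  | nil => simp [pvRunOnes]
  | cons c rest ih =>
    simp only [pvRunOnes]
    split
    · rename_i h
      subst h
      rw [List.replicate_succ, List.cons_append]
      exact congrArg (List.cons '1') ih
    · simp

theorem pvRunOnes_head (l : List Char) (c : Char)
    (h : (pvRunOnes l).2.head? = some c) : c ≠ '1' := by
  induction l with
  | nil => simp [pvRunOnes] at h
  | cons d rest ih =>
    simp only [pvRunOnes] at h
    split at h
    · exact ih h
    · rename_i hd
      simp only [List.head?_cons, Option.some.injEq] at h
      subst h
      exact hd

theorem pvLoopB_acc (ps : List (List Char)) (offset : Int) (acc : List (Int × Int)) :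
    pvLoopB ps offset acc = acc ++ pvLoopB ps offset [] := by
  induction ps generalizing offset acc with
  | nil => simp [pvLoopB]
  | cons p ps ih =>
    simp only [pvLoopB]
    rw [ih]
    conv_rhs => rw [ih]
    split <;> simp

theorem pySplit0_replicate (k : Nat) (t : List Char) :
    pySplit0 (List.replicate k '1' ++ t) =
      (List.replicate k '1' ++ (pySplit0 t).headI) :: (pySplit0 t).tail := by
  induction k with
  | zero =>
    simp
    cases h : pySplit0 t with
    | nil => exact absurd h (pySplit0_ne_nil t)
    | cons p ps => simp
  | succ k ih =>
    simp only [List.replicate_succ, List.cons_append, pySplit0]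
    rw [if_neg (by decide)]
    rw [ih]
    simp

theorem pvNorm_replicate_append (k : Nat) (t : List Char) :
    pvNorm (List.replicate k '1' ++ t) = List.replicate k '1' ++ pvNorm t := by
  simp [pvNorm, List.map_replicate]

theorem pvMain : ∀ (n : Nat) (l : List Char), l.length ≤ n → ∀ (i : Int),
    pvLoopB (pySplit0 (pvNorm l)) i [] = pvLoopA l i := by
  intro n
  induction n with
  | zero =>
    intro l hl i
    have : l = [] := List.eq_nil_of_length_eq_zero (Nat.le_zero.mp hl)
    subst this
    simp [pvNorm, pySplit0, pvLoopB, pvLoopA]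
  | succ n ih =>
    intro l hl i
    cases l with
    | nil => simp [pvNorm, pySplit0, pvLoopB, pvLoopA]
    | cons c rest =>
      by_cases hc : c = '1'
      · -- a run of ones starts here
        subst hc
        set k := (pvRunOnes ('1' :: rest)).1 with hk
        set r := (pvRunOnes ('1' :: rest)).2 with hr
        have hk1 : 1 ≤ k := by
          rw [hk]; simp [pvRunOnes]
        have hdec : ('1' :: rest : List Char) = List.replicate k '1' ++ r :=
          pvRunOnes_decomp ('1' :: rest)
        have hnorm : pvNorm ('1' :: rest) = List.replicate k '1' ++ pvNorm r := by
          rw [hdec, pvNorm_replicate_append]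
        have hlen : k + r.length = rest.length + 1 := by
          have := congrArg List.length hdec
          simpa using this.symm
        have hne : (List.replicate k '1').isEmpty = false := by
          simp; omega
        rw [pvLoopA]
        rw [dif_pos rfl]
        rw [← hk, ← hr]
        cases hr2 : r with
        | nil =>
          rw [hnorm, hr2]
          simp only [pvNorm, List.map_nil]
          rw [pySplit0_replicate]
          simp [pySplit0, pvLoopB, pvLoopA, hne]
        | cons c' t' =>
          have hc' : c' ≠ '1' := pvRunOnes_head ('1' :: rest) c' (by rw [← hr, hr2]; rfl)
          have hnr : pvNorm (c' :: t') = '0' :: pvNorm t' := by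
            simp [pvNorm, hc']
          have ht' : t'.length ≤ n := by
            rw [hr2] at hlen
            simp [List.length_cons] at hlen
            simp at hl
            omega
          rw [hnorm, hr2, hnr, pySplit0_replicate, pySplit0_cons_zero]
          simp only [List.headI_cons, List.tail_cons, List.append_nil]
          simp only [pvLoopB, hne, Bool.false_eq_true, if_false, List.nil_append,
            List.length_replicate]
          rw [pvLoopB_acc]
          rw [ih t' ht' (i + (k : Int) + 1)]
          rw [pvLoopA]
          rw [dif_neg hc']
          simp
      · -- not a one: skip it
        have hnc : pvNorm (c :: rest) = '0' :: pvNorm rest := by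
          simp [pvNorm, hc]
        rw [hnc, pySplit0_cons_zero]
        simp only [pvLoopB, List.isEmpty_nil, if_true, List.length_nil, Nat.cast_zero,
          add_zero]
        rw [ih rest (by simp at hl; omega) (i + 1)]
        rw [pvLoopA]
        rw [dif_neg hc]

-- ===== VERDICT (by name: the statement is the Claim_ definition above) =====
theorem comprimir_spec : Claim_equal_comprimir := by
  intro cadena _
  unfold Spec_comprimir comprimir comprimir_alt
  refine Prod.ext rfl ?_
  exact (pvMain cadena.toList.length cadena.toList le_rfl 0).symm
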